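-- pv_equiv track=rewrite | github.com/RamananVr/Leetcodepython | arrays/2684_maximum_number_of_moves_in_a_grid.py | maxMovesDP
-- ===== SOURCE A (Python) =====
-- from typing import List
--
-- def maxMovesDP(grid: List[List[int]]) -> int:
--     """
--     Dynamic programming approach - bottom-up.
--
--     Time Complexity: O(m * n)
--     Space Complexity: O(m * n)
--     """
--     m, n = len(grid), len(grid[0])
--
--     # dp[i][j] = maximum moves starting from cell (i, j)
--     dp = [[0] * n for _ in range(m)]
--
--     # Fill dp table from right to left
--     for col in range(n - 2, -1, -1):
--         for row in range(m):
--             current_val = grid[row][col]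
--
--             # Check all three possible moves
--             for next_row in [row - 1, row, row + 1]:
--                 if (0 <= next_row < m and
--                     grid[next_row][col + 1] > current_val):
--                     dp[row][col] = max(dp[row][col], 1 + dp[next_row][col + 1])
--
--     # Return maximum moves starting from first column
--     return max(dp[i][0] for i in range(m))
-- ===== SOURCE B (Python) =====
-- from typing import List
-- from functools import lru_cache
--
-- def maxMovesDP(grid: List[List[int]]) -> int:
--     """Top-down memoized recursion over (row, col) instead of a bottom-up table."""
--     m, n = len(grid), len(grid[0])
--
--     @lru_cache(maxsize=None)
--     def solve(r: int, c: int) -> int: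
--         if c + 1 >= n:
--             return 0
--         best = 0
--         for nr in (r - 1, r, r + 1):
--             if 0 <= nr < m and grid[nr][c + 1] > grid[r][c]:
--                 best = max(best, 1 + solve(nr, c + 1))
--         return best
--
--     return max(solve(i, 0) for i in range(m))
-- ===== Notes on version B (the rewrite author's own statement) =====
-- stated objective: faster
-- what changed: Replaces the bottom-up m*n DP table filled right-to-left with a top-down memoized recursion solve(r,c) that only visits cells reachable from column 0, taking the max over solve(i,0).
import Mathlib
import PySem

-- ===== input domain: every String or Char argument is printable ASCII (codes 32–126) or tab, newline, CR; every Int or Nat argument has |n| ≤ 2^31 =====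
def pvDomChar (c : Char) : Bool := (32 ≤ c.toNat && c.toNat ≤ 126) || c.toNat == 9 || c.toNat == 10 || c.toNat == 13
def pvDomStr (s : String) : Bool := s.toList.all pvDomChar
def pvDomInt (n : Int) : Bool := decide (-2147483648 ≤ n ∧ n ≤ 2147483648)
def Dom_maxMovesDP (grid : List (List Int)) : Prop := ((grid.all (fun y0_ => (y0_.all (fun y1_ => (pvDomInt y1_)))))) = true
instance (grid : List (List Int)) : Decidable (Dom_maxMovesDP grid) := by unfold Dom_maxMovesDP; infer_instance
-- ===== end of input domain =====

-- B replaces A's bottom-up DP table with a top-down memoized recursion over (row, col); same return value on Pre_.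

-- shared helper: grid[r][c] (both Pythons index the same structure the same way; total form, only used in range)
def gget (grid : List (List Int)) (r c : Int) : Int :=
  PySem.List.pyGetD (PySem.List.pyGetD grid r []) c 0

-- ===== PORT A =====
-- inner 'for next_row in [row - 1, row, row + 1]' loop, updating dp[row][col]
def cellStep (grid : List (List Int)) (m col : Int) (dp : List (List Int)) (row : Int) : List (List Int) :=
  let currentVal := gget grid row col
  [row - 1, row, row + 1].foldl (fun dp nextRow =>
    if 0 ≤ nextRow ∧ nextRow < m ∧ gget grid nextRow (col + 1) > currentVal then
      PySem.List.pySetD dp row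
        (PySem.List.pySetD (PySem.List.pyGetD dp row []) col
          (max (gget dp row col) (1 + gget dp nextRow (col + 1))))
    else dp) dp

-- 'for row in range(m)' loop for one column
def colStep (grid : List (List Int)) (m : Int) (dp : List (List Int)) (col : Int) : List (List Int) :=
  (PySem.List.pyRange 0 m 1).foldl (fun dp row => cellStep grid m col dp row) dp

def maxMovesDP (grid : List (List Int)) : Int :=
  let m : Int := grid.length
  let n : Int := (PySem.List.pyGetD grid 0 []).length
  let dp0 := List.replicate grid.length (List.replicate (PySem.List.pyGetD grid 0 []).length (0 : Int))
  let dp := (PySem.List.pyRange (n - 2) (-1) (-1)).foldl (fun dp col => colStep grid m dp col) dp0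
  (PySem.List.max? ((PySem.List.pyRange 0 m 1).map (fun i => gget dp i 0)) (fun x => x)).getD 0

-- ===== PORT B =====
-- recursive solve(r, c) (memoization is a Python performance device only; fuel ≥ n - c merely makes the recursion total)
def solveB (grid : List (List Int)) (m n : Int) : Nat → Int → Int → Int
  | 0, _, _ => 0
  | fuel + 1, r, c =>
    if c + 1 ≥ n then 0
    else [r - 1, r, r + 1].foldl (fun best nr =>
      if 0 ≤ nr ∧ nr < m ∧ gget grid nr (c + 1) > gget grid r c then
        max best (1 + solveB grid m n fuel nr (c + 1))
      else best) 0

def maxMovesDP_alt (grid : List (List Int)) : Int :=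
  let m : Int := grid.length
  let n : Int := (PySem.List.pyGetD grid 0 []).length
  (PySem.List.max? ((PySem.List.pyRange 0 m 1).map (fun i => solveB grid m n n.toNat i 0)) (fun x => x)).getD 0

-- ===== PRECONDITION & SPEC =====
-- exactly the inputs on which the Python A returns: nonempty grid, nonempty first row, and (except
-- when n = 1, where no cell beyond column 0 is ever read) every row at least as long as grid[0]
def Pre_maxMovesDP (grid : List (List Int)) : Prop :=
  grid ≠ [] ∧ 1 ≤ (grid.headD []).length ∧
    ((grid.headD []).length = 1 ∨ ∀ row ∈ grid, (grid.headD []).length ≤ row.length)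

instance (grid : List (List Int)) : Decidable (Pre_maxMovesDP grid) := by
  unfold Pre_maxMovesDP; infer_instance

def pvWitness_maxMovesDP : List (List Int) := [[1, 2, 3], [4, 0, 5]]

def Spec_maxMovesDP (grid : List (List Int)) (out : Int) : Prop := out = maxMovesDP_alt grid
instance (grid : List (List Int)) (out : Int) : Decidable (Spec_maxMovesDP grid out) := by
  unfold Spec_maxMovesDP; infer_instance

-- ===== CLAIM (what is proved, stated in full; the proofs are below) =====
def Claim_equal_maxMovesDP : Prop :=
  ∀ (grid : List (List Int)), Dom_maxMovesDP grid → Pre_maxMovesDP grid →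
    Spec_maxMovesDP grid (maxMovesDP grid)

-- ===== LEMMAS AND PROOFS =====

-- canonical (fuel-independent) value of B's recursion
def sol (grid : List (List Int)) (m n r c : Int) : Int :=
  solveB grid m n (n - c).toNat r c

-- Nat-indexed dp access / single-cell update, for the loop invariants
def G (dp : List (List Int)) (r c : Nat) : Int := (dp.getD r []).getD c 0

def S (dp : List (List Int)) (r c : Nat) (v : Int) : List (List Int) :=
  dp.set r ((dp.getD r []).set c v)

def Shape (m n : Nat) (dp : List (List Int)) : Prop :=
  dp.length = m ∧ ∀ r : Nat, r < m → (dp.getD r []).length = n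

theorem gget_eq_G (dp : List (List Int)) (r c : Nat) : gget dp (r : Int) (c : Int) = G dp r c := by
  simp [gget, G]

theorem solveB_fuel (grid : List (List Int)) (m n : Int) :
    ∀ (fuel fuel' : Nat) (r c : Int), n - c ≤ fuel → n - c ≤ fuel' →
      solveB grid m n fuel r c = solveB grid m n fuel' r c := by
  intro fuel
  induction fuel with
  | zero =>
    intro fuel' r c h h'
    cases fuel' with
    | zero => rfl
    | succ k' =>
      have : c + 1 ≥ n := by omega
      simp [solveB, this]
  | succ k ih =>
    intro fuel' r c h h'
    cases fuel' with
    | zero =>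
      have : c + 1 ≥ n := by omega
      simp [solveB, this]
    | succ k' =>
      by_cases hge : c + 1 ≥ n
      · simp [solveB, hge]
      · have hk : n - (c + 1) ≤ (k : Int) := by omega
        have hk' : n - (c + 1) ≤ (k' : Int) := by omega
        simp only [solveB, if_neg hge, List.foldl]
        rw [ih k' (r - 1) (c + 1) hk hk', ih k' r (c + 1) hk hk', ih k' (r + 1) (c + 1) hk hk']

theorem sol_last (grid : List (List Int)) (m n r c : Int) (h : n ≤ c + 1) :
    sol grid m n r c = 0 := by
  unfold sol
  cases hf : (n - c).toNat with
  | zero => rfl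
  | succ k => simp [solveB, h]

theorem sol_unfold (grid : List (List Int)) (m n r c : Int) (_hc : 0 ≤ c) (hcn : c + 1 < n) :
    sol grid m n r c =
      [r - 1, r, r + 1].foldl (fun best nr =>
        if 0 ≤ nr ∧ nr < m ∧ gget grid nr (c + 1) > gget grid r c then
          max best (1 + sol grid m n nr (c + 1))
        else best) 0 := by
  unfold sol
  have h1 : (n - c).toNat = ((n - c).toNat - 1) + 1 := by omega
  rw [h1]
  have hge : ¬ (c + 1 ≥ n) := by omega
  simp only [solveB, if_neg hge, List.foldl]
  have he : ∀ nr : Int, solveB grid m n ((n - c).toNat - 1) nr (c + 1)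
      = solveB grid m n (n - (c + 1)).toNat nr (c + 1) := by
    intro nr
    exact solveB_fuel grid m n _ _ nr (c + 1) (by omega) (by omega)
  rw [he, he, he]

theorem getD_set_list {α : Type} (xs : List α) (i j : Nat) (v d : α) (hi : i < xs.length) :
    (xs.set i v).getD j d = if j = i then v else xs.getD j d := by
  simp only [List.getD_eq_getElem?_getD, List.getElem?_set]
  by_cases h : i = j
  · subst h; simp [hi]
  · simp [h, Ne.symm h]

theorem G_S (dp : List (List Int)) (r c : Nat) (v : Int)
    (hr : r < dp.length) (hc : c < (dp.getD r []).length) (r' c' : Nat) :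
    G (S dp r c v) r' c' = if r' = r ∧ c' = c then v else G dp r' c' := by
  unfold G S
  rw [getD_set_list _ _ _ _ _ hr]
  by_cases h1 : r' = r
  · subst h1
    rw [if_pos rfl, getD_set_list _ _ _ _ _ hc]
    by_cases h2 : c' = c
    · simp [h2]
    · simp [h2]
  · simp [h1]

theorem Shape_S (m n : Nat) (dp : List (List Int)) (hs : Shape m n dp) (r c : Nat) (v : Int) :
    Shape m n (S dp r c v) := by
  obtain ⟨h1, h2⟩ := hs
  constructor
  · simp [S, h1]
  · intro r' hr'
    unfold S
    by_cases hlen : r < dp.length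
    · rw [getD_set_list _ _ _ _ _ hlen]
      by_cases h : r' = r
      · rw [if_pos h, List.length_set]; subst h; exact h2 r' hr'
      · rw [if_neg h]; exact h2 r' hr'
    · rw [List.set_eq_of_length_le (by omega)]
      exact h2 r' hr'

theorem cell_fold (grid : List (List Int)) (m n row t : Nat) (hrow : row < m) (htn : t + 1 < n) :
    ∀ (nrs : List Int) (dp : List (List Int)), Shape m n dp →
      (∀ nr : Nat, nr < m → G dp nr (t + 1) = sol grid m n nr (t + 1)) →
      Shape m n (nrs.foldl (fun dp nextRow =>
          if 0 ≤ nextRow ∧ nextRow < (m : Int) ∧ gget grid nextRow ((t : Int) + 1) > gget grid row t then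
            PySem.List.pySetD dp (row : Int)
              (PySem.List.pySetD (PySem.List.pyGetD dp (row : Int) []) (t : Int)
                (max (gget dp row t) (1 + gget dp nextRow ((t : Int) + 1))))
          else dp) dp) ∧
      ∀ r' c' : Nat, r' < m → c' < n →
        G (nrs.foldl (fun dp nextRow =>
          if 0 ≤ nextRow ∧ nextRow < (m : Int) ∧ gget grid nextRow ((t : Int) + 1) > gget grid row t then
            PySem.List.pySetD dp (row : Int)
              (PySem.List.pySetD (PySem.List.pyGetD dp (row : Int) []) (t : Int)
                (max (gget dp row t) (1 + gget dp nextRow ((t : Int) + 1))))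
          else dp) dp) r' c' =
          if r' = row ∧ c' = t then
            nrs.foldl (fun best nr =>
              if 0 ≤ nr ∧ nr < (m : Int) ∧ gget grid nr ((t : Int) + 1) > gget grid row t then
                max best (1 + sol grid m n nr ((t : Int) + 1))
              else best) (G dp row t)
          else G dp r' c' := by
  intro nrs
  induction nrs with
  | nil =>
    intro dp hs hcol
    refine ⟨hs, ?_⟩
    intro r' c' hr' hc'
    simp only [List.foldl_nil]
    by_cases h : r' = row ∧ c' = t
    · rw [if_pos h, h.1, h.2]
    · rw [if_neg h]
  | cons nr rest ih =>
    intro dp hs hcol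
    simp only [List.foldl_cons]
    by_cases hcond : 0 ≤ nr ∧ nr < (m : Int) ∧ gget grid nr ((t : Int) + 1) > gget grid row t
    · rw [if_pos hcond, if_pos hcond]
      -- lift nr to a Nat
      obtain ⟨k, rfl⟩ : ∃ k : Nat, nr = (k : Int) := ⟨nr.toNat, (Int.toNat_of_nonneg hcond.1).symm⟩
      have hk : k < m := by exact_mod_cast hcond.2.1
      have hset : (PySem.List.pySetD dp (row : Int)
              (PySem.List.pySetD (PySem.List.pyGetD dp (row : Int) []) (t : Int)
                (max (gget dp row t) (1 + gget dp k ((t : Int) + 1)))))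
          = S dp row t (max (G dp row t) (1 + sol grid m n k ((t : Int) + 1))) := by
        have h1 : gget dp (row : Int) (t : Int) = G dp row t := gget_eq_G dp row t
        have h2 : gget dp (k : Int) ((t : Int) + 1) = sol grid m n k ((t : Int) + 1) := by
          have : ((t : Int) + 1) = ((t + 1 : Nat) : Int) := by push_cast; ring
          rw [this, gget_eq_G]
          rw [hcol k hk]
          norm_cast
        rw [h1, h2]
        simp [S, G]
      rw [hset]
      set v := max (G dp row t) (1 + sol grid m n k ((t : Int) + 1)) with hv
      have hrlen : row < dp.length := by rw [hs.1]; exact hrow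
      have hclen : t < (dp.getD row []).length := by rw [hs.2 row hrow]; omega
      have hs' : Shape m n (S dp row t v) := Shape_S m n dp hs row t v
      have hcol' : ∀ nr2 : Nat, nr2 < m → G (S dp row t v) nr2 (t + 1) = sol grid m n nr2 (t + 1) := by
        intro nr2 hnr2
        rw [G_S dp row t v hrlen hclen, if_neg (by omega)]
        exact hcol nr2 hnr2
      obtain ⟨hsr, hgr⟩ := ih (S dp row t v) hs' hcol'
      refine ⟨hsr, ?_⟩
      intro r' c' hr' hc'
      rw [hgr r' c' hr' hc']
      have hGv : G (S dp row t v) row t = v := by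
        rw [G_S dp row t v hrlen hclen]; simp
      by_cases hcell : r' = row ∧ c' = t
      · rw [if_pos hcell, if_pos hcell, hGv]
      · rw [if_neg hcell, if_neg hcell, G_S dp row t v hrlen hclen, if_neg hcell]
    · rw [if_neg hcond, if_neg hcond]
      exact ih dp hs hcol


theorem col_fold (grid : List (List Int)) (m n t : Nat) (htn : t + 1 < n)
    (dp : List (List Int)) (hs : Shape m n dp)
    (hdp : ∀ r c : Nat, r < m → c < n →
      G dp r c = if (t : Int) < (c : Int) then sol grid m n r c else 0) :
    ∀ j : Nat, j ≤ m →
      Shape m n ((PySem.List.pyRange 0 (j : Int) 1).foldl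
          (fun dp row => cellStep grid m (t : Int) dp row) dp) ∧
      ∀ r c : Nat, r < m → c < n →
        G ((PySem.List.pyRange 0 (j : Int) 1).foldl
            (fun dp row => cellStep grid m (t : Int) dp row) dp) r c =
          if (t : Int) < (c : Int) then sol grid m n r c
          else if c = t ∧ r < j then sol grid m n r t else 0 := by
  intro j
  induction j with
  | zero =>
    intro _
    rw [PySem.List.pyRange_one_eq_nil (by omega)]
    refine ⟨hs, ?_⟩
    intro r c hr hc
    simp only [List.foldl_nil]
    rw [hdp r c hr hc]
    by_cases h : (t : Int) < (c : Int)
    · rw [if_pos h, if_pos h]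
    · rw [if_neg h, if_neg h, if_neg (by omega)]
  | succ j ih =>
    intro hj
    obtain ⟨ihs, ihg⟩ := ih (by omega)
    have hsplit : PySem.List.pyRange 0 ((j + 1 : Nat) : Int) 1
        = PySem.List.pyRange 0 (j : Int) 1 ++ [(j : Int)] := by
      push_cast
      exact PySem.List.pyRange_one_succ_right (by omega)
    rw [hsplit, List.foldl_append]
    set dpj := (PySem.List.pyRange 0 (j : Int) 1).foldl
        (fun dp row => cellStep grid m (t : Int) dp row) dp with hdpj
    simp only [List.foldl_cons, List.foldl_nil]
    have hcol : ∀ nr : Nat, nr < m → G dpj nr (t + 1) = sol grid m n nr (t + 1) := by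
      intro nr hnr
      rw [ihg nr (t + 1) hnr (by omega), if_pos (by push_cast; omega)]
      push_cast
      ring_nf
    obtain ⟨hsr, hgr⟩ := cell_fold grid m n j t (by omega) htn
        [(j : Int) - 1, (j : Int), (j : Int) + 1] dpj ihs hcol
    have hcell : cellStep grid (m : Int) (t : Int) dpj (j : Int)
        = [(j : Int) - 1, (j : Int), (j : Int) + 1].foldl (fun dp nextRow =>
          if 0 ≤ nextRow ∧ nextRow < (m : Int) ∧ gget grid nextRow ((t : Int) + 1) > gget grid j t then
            PySem.List.pySetD dp (j : Int)
              (PySem.List.pySetD (PySem.List.pyGetD dp (j : Int) []) (t : Int)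
                (max (gget dp j t) (1 + gget dp nextRow ((t : Int) + 1))))
          else dp) dpj := rfl
    rw [hcell]
    refine ⟨hsr, ?_⟩
    intro r c hr hc
    rw [hgr r c hr hc]
    have hGjt : G dpj j t = 0 := by
      rw [ihg j t (by omega) (by omega), if_neg (by omega), if_neg (by omega)]
    have hsolval : [(j : Int) - 1, (j : Int), (j : Int) + 1].foldl (fun best nr =>
          if 0 ≤ nr ∧ nr < (m : Int) ∧ gget grid nr ((t : Int) + 1) > gget grid j t then
            max best (1 + sol grid m n nr ((t : Int) + 1))
          else best) (G dpj j t) = sol grid m n j t := by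
      rw [hGjt, sol_unfold grid m n (j : Int) (t : Int) (by omega) (by exact_mod_cast htn)]
    by_cases hrc : r = j ∧ c = t
    · obtain ⟨hr1, hc1⟩ := hrc
      subst hr1; subst hc1
      rw [if_pos ⟨rfl, rfl⟩, hsolval, if_neg (by omega), if_pos (by omega)]
    · rw [if_neg hrc, ihg r c hr hc]
      by_cases h1 : (t : Int) < (c : Int)
      · rw [if_pos h1, if_pos h1]
      · rw [if_neg h1, if_neg h1]
        by_cases h2 : c = t ∧ r < j
        · rw [if_pos h2, if_pos (by omega)]
        · rw [if_neg h2, if_neg (by omega)]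

theorem pyRange_neg_split (a b : Int) (h : b < a) :
    PySem.List.pyRange a b (-1) = PySem.List.pyRange a (b + 1) (-1) ++ [b + 1] := by
  rw [PySem.List.pyRange_neg_one_eq_reverse, PySem.List.pyRange_neg_one_eq_reverse,
      PySem.List.pyRange_one_cons (by omega)]
  simp

theorem getD_replicate_zero (n c : Nat) : (List.replicate n (0 : Int)).getD c 0 = 0 := by
  rw [List.getD_eq_getElem?_getD, List.getElem?_replicate]
  split <;> simp

theorem Shape_dp0 (m n : Nat) : Shape m n (List.replicate m (List.replicate n (0 : Int))) := by
  constructor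
  · simp
  · intro r hr
    rw [List.getD_eq_getElem?_getD, List.getElem?_replicate, if_pos hr]
    simp

theorem G_dp0 (m n : Nat) (r c : Nat) : G (List.replicate m (List.replicate n (0 : Int))) r c = 0 := by
  unfold G
  rcases lt_or_ge r m with hr | hr
  · rw [show (List.replicate m (List.replicate n (0 : Int))).getD r [] = List.replicate n 0 by
        rw [List.getD_eq_getElem?_getD, List.getElem?_replicate, if_pos hr]; rfl]
    exact getD_replicate_zero n c
  · rw [show (List.replicate m (List.replicate n (0 : Int))).getD r [] = [] by
        rw [List.getD_eq_getElem?_getD, List.getElem?_replicate, if_neg (by omega)]; rfl]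
    simp

theorem cols_fold (grid : List (List Int)) (m n : Nat) (hn : 1 ≤ n) :
    ∀ k : Nat, k ≤ n - 1 →
      Shape m n ((PySem.List.pyRange ((n : Int) - 2) ((n : Int) - 2 - (k : Int)) (-1)).foldl
          (fun dp col => colStep grid (m : Int) dp col)
          (List.replicate m (List.replicate n (0 : Int)))) ∧
      ∀ r c : Nat, r < m → c < n →
        G ((PySem.List.pyRange ((n : Int) - 2) ((n : Int) - 2 - (k : Int)) (-1)).foldl
            (fun dp col => colStep grid (m : Int) dp col)
            (List.replicate m (List.replicate n (0 : Int)))) r c =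
          if (n : Int) - 2 - (k : Int) < (c : Int) then sol grid m n r c else 0 := by
  intro k
  induction k with
  | zero =>
    intro _
    rw [show ((n : Int) - 2 - ((0 : Nat) : Int)) = (n : Int) - 2 by omega,
        PySem.List.pyRange_neg_one_eq_nil (by omega)]
    refine ⟨Shape_dp0 m n, ?_⟩
    intro r c hr hc
    simp only [List.foldl_nil]
    rw [G_dp0]
    by_cases h : (n : Int) - 2 < (c : Int)
    · rw [if_pos h, sol_last grid m n r c (by omega)]
    · rw [if_neg h]
  | succ k ih =>
    intro hk
    have hk2 : k + 2 ≤ n := by omega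
    obtain ⟨ihs, ihg⟩ := ih (by omega)
    have hsplit : PySem.List.pyRange ((n : Int) - 2) ((n : Int) - 2 - ((k + 1 : Nat) : Int)) (-1)
        = PySem.List.pyRange ((n : Int) - 2) ((n : Int) - 2 - (k : Int)) (-1)
          ++ [(n : Int) - 2 - (k : Int)] := by
      rw [show ((n : Int) - 2 - ((k + 1 : Nat) : Int)) = ((n : Int) - 2 - (k : Int)) - 1 by
            push_cast; ring,
          pyRange_neg_split _ _ (by omega),
          show ((n : Int) - 2 - (k : Int)) - 1 + 1 = (n : Int) - 2 - (k : Int) by ring]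
    rw [hsplit, List.foldl_append]
    set dpk := (PySem.List.pyRange ((n : Int) - 2) ((n : Int) - 2 - (k : Int)) (-1)).foldl
        (fun dp col => colStep grid (m : Int) dp col)
        (List.replicate m (List.replicate n (0 : Int))) with hdpk
    simp only [List.foldl_cons, List.foldl_nil]
    have hcast : (n : Int) - 2 - (k : Int) = ((n - 2 - k : Nat) : Int) := by omega
    rw [hcast]
    set tN := n - 2 - k with htN
    have htn : tN + 1 < n := by omega
    have hcol : colStep grid (m : Int) dpk (tN : Int)
        = (PySem.List.pyRange 0 (m : Int) 1).foldl
            (fun dp row => cellStep grid (m : Int) (tN : Int) dp row) dpk := rfl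
    rw [hcol]
    have hdp : ∀ r c : Nat, r < m → c < n →
        G dpk r c = if (tN : Int) < (c : Int) then sol grid m n r c else 0 := by
      intro r c hr hc
      rw [ihg r c hr hc]
      by_cases h : (tN : Int) < (c : Int)
      · rw [if_pos h, if_pos (by omega)]
      · rw [if_neg h, if_neg (by omega)]
    obtain ⟨hsr, hgr⟩ := col_fold grid m n tN htn dpk ihs hdp m (le_refl m)
    refine ⟨hsr, ?_⟩
    intro r c hr hc
    rw [hgr r c hr hc]
    by_cases h1 : (tN : Int) < (c : Int)
    · rw [if_pos h1, if_pos (by omega)]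
    · rw [if_neg h1]
      by_cases h2 : c = tN ∧ r < m
      · rw [if_pos h2, if_pos (by omega), h2.1]
      · rw [if_neg h2, if_neg (by omega)]


theorem final (grid : List (List Int)) (hpre : Pre_maxMovesDP grid) :
    maxMovesDP grid = maxMovesDP_alt grid := by
  obtain ⟨hne, hn1, -⟩ := hpre
  obtain ⟨g0, rest, rfl⟩ := List.exists_cons_of_ne_nil hne
  simp only [List.headD_cons] at hn1
  simp only [maxMovesDP, maxMovesDP_alt, PySem.List.pyGetD_zero_cons]
  set M := (g0 :: rest).length with hM
  set N := g0.length with hN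
  obtain ⟨-, hchar⟩ := cols_fold (g0 :: rest) M N hn1 (N - 1) (le_refl _)
  rw [show ((N : Int) - 2 - ((N - 1 : Nat) : Int)) = -1 by omega] at hchar
  suffices h : ∀ i ∈ PySem.List.pyRange 0 (M : Int) 1,
      gget ((PySem.List.pyRange ((N : Int) - 2) (-1) (-1)).foldl
        (fun dp col => colStep (g0 :: rest) (M : Int) dp col)
        (List.replicate M (List.replicate N (0 : Int)))) i 0
      = solveB (g0 :: rest) (M : Int) (N : Int) ((N : Int)).toNat i 0 by
    rw [List.map_congr_left h]
  intro i hi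
  obtain ⟨h0, hiM⟩ := PySem.List.mem_pyRange_one.mp hi
  obtain ⟨iN, rfl⟩ : ∃ k : Nat, i = (k : Int) := ⟨i.toNat, (Int.toNat_of_nonneg h0).symm⟩
  have hiM' : iN < M := by exact_mod_cast hiM
  have hg : gget ((PySem.List.pyRange ((N : Int) - 2) (-1) (-1)).foldl
      (fun dp col => colStep (g0 :: rest) (M : Int) dp col)
      (List.replicate M (List.replicate N (0 : Int)))) (iN : Int) 0
      = sol (g0 :: rest) M N iN 0 := by
    have := gget_eq_G ((PySem.List.pyRange ((N : Int) - 2) (-1) (-1)).foldl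
      (fun dp col => colStep (g0 :: rest) (M : Int) dp col)
      (List.replicate M (List.replicate N (0 : Int)))) iN 0
    rw [Nat.cast_zero] at this
    rw [this, hchar iN 0 hiM' (by omega), if_pos (by omega), Nat.cast_zero]
  rw [hg]
  rw [show ((N : Int)).toNat = N from Int.toNat_natCast N]
  unfold sol
  rw [show ((N : Int) - 0).toNat = N by omega]

-- ===== VERDICT (by name: the statement is the Claim_ definition above) =====
theorem maxMovesDP_spec : Claim_equal_maxMovesDP := by
  intro grid _ hpre
  unfold Spec_maxMovesDP
  exact final grid hpre
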